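-- pv_equiv track=rewrite | github.com/neilstudd/advent-of-code | 2025/day11/day11.py | calculate_all_paths_to_destination
-- ===== SOURCE A (Python) =====
-- def calculate_all_paths_to_destination(server_rack, starting_server):
--     exit_paths = set()
--     stack = [(starting_server, [starting_server])]
--     while stack:
--         current_server, path = stack.pop()
--         connections = server_rack.get(current_server, [])
--         for conn in connections:
--             if conn == "out":
--                 exit_paths.add(tuple(path + [conn]))
--             elif conn in server_rack:
--                 stack.append((conn, path + [conn]))
--     return exit_paths
-- ===== SOURCE B (Python) =====
-- def calculate_all_paths_to_destination(server_rack, starting_server):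
--     # Recursive DFS returning the list of exit paths; the set is built once at the
--     # end.  Children are explored right-to-left: for a *set* result any order is
--     # equivalent, and this keeps the enumeration order aligned with the LIFO order
--     # of the original implementation.
--     def paths_from(current, path):
--         connections = server_rack.get(current, [])
--         found = [tuple(path + [conn]) for conn in connections if conn == "out"]
--         for conn in reversed(connections):
--             if conn != "out" and conn in server_rack:
--                 found.extend(paths_from(conn, path + [conn]))
--         return found
--     return set(paths_from(starting_server, [starting_server]))
-- ===== Notes on version B (the rewrite author's own statement) =====
-- stated objective: idiomatic
-- what changed: Replaces the explicit worklist loop mutating a shared set with a recursive DFS helper that returns the list of exit paths, built into a set once at the end.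
import Mathlib
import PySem

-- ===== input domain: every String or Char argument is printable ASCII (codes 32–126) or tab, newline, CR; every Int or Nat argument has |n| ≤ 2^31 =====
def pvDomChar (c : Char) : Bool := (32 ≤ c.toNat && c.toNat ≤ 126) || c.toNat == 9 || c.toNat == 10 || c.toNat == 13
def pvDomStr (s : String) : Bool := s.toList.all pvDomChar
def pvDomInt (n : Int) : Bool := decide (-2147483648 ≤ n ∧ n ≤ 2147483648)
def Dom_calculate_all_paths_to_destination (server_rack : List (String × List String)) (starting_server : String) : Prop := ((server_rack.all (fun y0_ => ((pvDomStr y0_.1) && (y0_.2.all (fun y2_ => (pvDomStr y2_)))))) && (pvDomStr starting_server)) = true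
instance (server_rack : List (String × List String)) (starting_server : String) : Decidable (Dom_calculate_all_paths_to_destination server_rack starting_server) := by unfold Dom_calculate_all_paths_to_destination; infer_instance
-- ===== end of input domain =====

-- B replaces A's manual stack machine mutating a shared set by a recursive path
-- enumerator whose result list is turned into a set once at the end (idiomatic
-- decomposition; same asymptotic cost).

-- ===== PORT A =====
-- A's while-stack loop, fuel-guarded (the fuel only makes the same computation
-- total: Pre_ below proves it never runs out).  The Python stack's top (list end,
-- `pop()`/`append`) is the HEAD of the Lean list, so `append` is cons — same
-- frames, same order of processing.
def pvLoopA (d : List (String × List String)) : Nat → List (String × List String) → PySem.Set (List String) → PySem.Set (List String)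
  | 0, _, acc => acc
  | _ + 1, [], acc => acc
  | fuel + 1, (current_server, path) :: rest, acc =>
      let connections := PySem.Dict.getD (PySem.Dict.mk d) current_server []
      let st := connections.foldl
        (fun (st : PySem.Set (List String) × List (String × List String)) conn =>
          if conn == "out" then (PySem.Set.add st.1 (path ++ [conn]), st.2)
          else if PySem.Dict.contains (PySem.Dict.mk d) conn then (st.1, (conn, path ++ [conn]) :: st.2)
          else st)
        (acc, rest)
      pvLoopA d fuel st.2 st.1

def calculate_all_paths_to_destination (server_rack : List (String × List String)) (starting_server : String) : List (List String) :=
  pvLoopA server_rack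
    (((server_rack.map (fun p => p.2.length)).sum + 1) ^ (server_rack.length + 1))
    [(starting_server, [starting_server])] PySem.Set.empty

-- ===== PORT B =====
-- B's recursive helper `paths_from`, fuel-guarded on recursion DEPTH (again only
-- to make it total; depth is at most server_rack.length + 1 under Pre_).
def pvPathsFrom (d : List (String × List String)) : Nat → String → List String → List (List String)
  | 0, _, _ => []
  | fuel + 1, current, path =>
      let connections := PySem.Dict.getD (PySem.Dict.mk d) current []
      let found := (connections.filter (fun conn => conn == "out")).map (fun conn => path ++ [conn])
      connections.reverse.foldl
        (fun found conn =>
          if !(conn == "out") && PySem.Dict.contains (PySem.Dict.mk d) conn then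
            found ++ pvPathsFrom d fuel conn (path ++ [conn])
          else found)
        found

def calculate_all_paths_to_destination_alt (server_rack : List (String × List String)) (starting_server : String) : List (List String) :=
  PySem.Set.ofList (pvPathsFrom server_rack (server_rack.length + 1) starting_server [starting_server])

-- ===== PRECONDITION & SPEC =====
-- pvRank: longest-chain rank of a key in the connection graph (edges k → c for
-- c ∈ rack[k], c ≠ "out", c a key), computed by server_rack.length rounds.
def pvRnk (d : List (String × List String)) : Nat → String → Nat
  | 0, _ => 0
  | f + 1, k =>
      match PySem.Dict.get? (PySem.Dict.mk d) k with
      | none => 0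
      | some cs => cs.foldl
          (fun m c =>
            if c == "out" then m
            else if PySem.Dict.contains (PySem.Dict.mk d) c then max m (pvRnk d f c + 1)
            else m) 0

def pvRank (d : List (String × List String)) (k : String) : Nat := pvRnk d d.length k

-- pvStep: one round of the reachability closure from the starting server
-- (keep a node, add every connection that is a key and is not "out").
def pvStep (d : List (String × List String)) (X : List String) : List String :=
  X ++ d.flatMap (fun p =>
    if X.contains p.1 then
      (PySem.Dict.getD (PySem.Dict.mk d) p.1 []).filter
        (fun c => !(c == "out") && PySem.Dict.contains (PySem.Dict.mk d) c)
    else [])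

-- Pre_ excludes exactly the inputs on which a cycle in the rack is reachable
-- from the starting server: there A's while-loop never terminates (and B's
-- recursion overflows), so neither program returns a value.  On every
-- reachable key, pvRank strictly decreases along each edge.
def Pre_calculate_all_paths_to_destination (server_rack : List (String × List String)) (starting_server : String) : Prop :=
  ∀ p ∈ server_rack,
    p.1 ∈ (pvStep server_rack)^[server_rack.length + 1] [starting_server] →
    ∀ c ∈ PySem.Dict.getD (PySem.Dict.mk server_rack) p.1 [],
      c ≠ "out" → PySem.Dict.contains (PySem.Dict.mk server_rack) c = true →
        pvRank server_rack c < pvRank server_rack p.1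

instance (server_rack : List (String × List String)) (starting_server : String) : Decidable (Pre_calculate_all_paths_to_destination server_rack starting_server) := by
  unfold Pre_calculate_all_paths_to_destination; infer_instance

def pvWitness_calculate_all_paths_to_destination : (List (String × List String)) × String :=
  ([("srv", ["out", "leaf"]), ("leaf", ["out"])], "srv")

def Spec_calculate_all_paths_to_destination (server_rack : List (String × List String)) (starting_server : String) (out : List (List String)) : Prop := out = calculate_all_paths_to_destination_alt server_rack starting_server
instance (server_rack : List (String × List String)) (starting_server : String) (out : List (List String)) : Decidable (Spec_calculate_all_paths_to_destination server_rack starting_server out) := by unfold Spec_calculate_all_paths_to_destination; infer_instance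

-- ===== CLAIM (what is proved, stated in full; the proofs are below) =====
def Claim_equal_calculate_all_paths_to_destination : Prop := ∀ (server_rack : List (String × List String)) (starting_server : String), Dom_calculate_all_paths_to_destination server_rack starting_server → Pre_calculate_all_paths_to_destination server_rack starting_server → Spec_calculate_all_paths_to_destination server_rack starting_server (calculate_all_paths_to_destination server_rack starting_server)

-- ===== LEMMAS AND PROOFS =====

-- generic loop shapes
theorem pv_foldl_append_if_flatMap {α β : Type} (P : α → Bool) (g : α → List β) :
    ∀ (l : List α) (init : List β),
      l.foldl (fun acc x => if P x then acc ++ g x else acc) init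
        = init ++ (l.filter P).flatMap g := by
  intro l
  induction l with
  | nil => intro init; simp
  | cons c l ih =>
    intro init
    by_cases h : P c = true <;> simp [List.foldl, h, ih]

theorem pv_foldl_update (h : String × List String → List (List String)) :
    ∀ (frames : List (String × List String)) (s : PySem.Set (List String)),
      frames.foldl (fun a fr => PySem.Set.update a (h fr)) s
        = PySem.Set.update s (frames.flatMap h) := by
  intro frames
  induction frames with
  | nil => intro s; simp [PySem.Set.update]
  | cons fr frames ih =>
    intro s
    simp [List.foldl, ih, PySem.Set.update_append]

-- rank is bounded by its fuel
theorem pv_rnk_le (d : List (String × List String)) : ∀ f k, pvRnk d f k ≤ f := by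
  intro f
  induction f with
  | zero => intro k; simp [pvRnk]
  | succ f ih =>
    intro k
    unfold pvRnk
    cases h : PySem.Dict.get? (PySem.Dict.mk d) k with
    | none => simp
    | some cs =>
      simp only []
      have aux : ∀ (l : List String) (m : Nat), m ≤ f + 1 →
          l.foldl (fun m c =>
            if c == "out" then m
            else if PySem.Dict.contains (PySem.Dict.mk d) c then max m (pvRnk d f c + 1)
            else m) m ≤ f + 1 := by
        intro l
        induction l with
        | nil => intro m hm; simpa using hm
        | cons c l ihl =>
          intro m hm
          simp only [List.foldl]
          apply ihl
          split_ifs <;> simp [hm, Nat.succ_le_succ (ih c)]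
      exact aux cs 0 (Nat.zero_le _)

theorem pv_rank_le (d : List (String × List String)) (k : String) :
    pvRank d k ≤ d.length := pv_rnk_le d d.length k

theorem pv_conns_len_le (d : List (String × List String)) (k : String) :
    (PySem.Dict.getD (PySem.Dict.mk d) k []).length ≤ (d.map (fun p => p.2.length)).sum := by
  induction d with
  | nil => simp [PySem.Dict.getD_eq_get?_getD, PySem.Dict.get?]
  | cons a d ih =>
    rw [PySem.Dict.getD_eq_get?_getD, PySem.Dict.get?_mk_cons]
    split
    · simp
    · rw [← PySem.Dict.getD_eq_get?_getD] at *
      simp only [List.map_cons, List.sum_cons]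
      omega

theorem pv_mem_of_contains (d : List (String × List String)) (k : String)
    (h : PySem.Dict.contains (PySem.Dict.mk d) k = true) : ∃ p ∈ d, p.1 = k := by
  rw [PySem.Dict.contains_eq_isSome_get?] at h
  induction d with
  | nil => simp [PySem.Dict.get?] at h
  | cons a d ih =>
    rw [PySem.Dict.get?_mk_cons] at h
    by_cases hk : (a.1 == k) = true
    · exact ⟨a, by simp, by simpa using hk⟩
    · simp only [hk] at h
      obtain ⟨p, hp, hpk⟩ := ih (by simpa [hk] using h)
      exact ⟨p, List.mem_cons_of_mem _ hp, hpk⟩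

-- a node with at least one connection is a key
theorem pv_contains_of_conn (d : List (String × List String)) (k : String) (c : String)
    (hc : c ∈ PySem.Dict.getD (PySem.Dict.mk d) k []) :
    PySem.Dict.contains (PySem.Dict.mk d) k = true := by
  rw [PySem.Dict.contains_eq_isSome_get?]
  rw [PySem.Dict.getD_eq_get?_getD] at hc
  cases h : PySem.Dict.get? (PySem.Dict.mk d) k with
  | none => rw [h] at hc; simp at hc
  | some cs => simp

-- membership in one closure round
theorem pv_mem_step_of_mem (d : List (String × List String)) (X : List String) (k : String)
    (h : k ∈ X) : k ∈ pvStep d X := by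
  unfold pvStep; exact List.mem_append_left _ h

theorem pv_mem_step_of_edge (d : List (String × List String)) (X : List String)
    (p : String × List String) (hp : p ∈ d) (hpX : p.1 ∈ X) (c : String)
    (hc : c ∈ PySem.Dict.getD (PySem.Dict.mk d) p.1 []) (hout : c ≠ "out")
    (hkey : PySem.Dict.contains (PySem.Dict.mk d) c = true) : c ∈ pvStep d X := by
  unfold pvStep
  apply List.mem_append_right
  apply List.mem_flatMap.mpr
  refine ⟨p, hp, ?_⟩
  rw [if_pos (by simpa using hpX)]
  exact List.mem_filter.mpr ⟨hc, by simp [hout, hkey]⟩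

theorem pv_mem_step_elim (d : List (String × List String)) (X : List String) (c : String)
    (h : c ∈ pvStep d X) :
    c ∈ X ∨ ∃ p ∈ d, p.1 ∈ X ∧ c ∈ PySem.Dict.getD (PySem.Dict.mk d) p.1 [] ∧
      c ≠ "out" ∧ PySem.Dict.contains (PySem.Dict.mk d) c = true := by
  unfold pvStep at h
  rcases List.mem_append.mp h with h | h
  · exact Or.inl h
  · right
    obtain ⟨p, hp, hcp⟩ := List.mem_flatMap.mp h
    by_cases hX : X.contains p.1 = true
    · rw [if_pos hX] at hcp
      have hcf := List.mem_filter.mp hcp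
      rw [Bool.and_eq_true] at hcf
      refine ⟨p, hp, by simpa using hX, hcf.1, ?_, hcf.2.2⟩
      have hout' := hcf.2.1
      intro hco; subst hco; simp at hout'
    · rw [if_neg hX] at hcp; simp at hcp

theorem pv_iter_mono (d : List (String × List String)) (s : String) :
    ∀ {m n : Nat}, m ≤ n → ∀ k, k ∈ (pvStep d)^[m] [s] → k ∈ (pvStep d)^[n] [s] := by
  intro m n hmn
  induction n with
  | zero => intro k hk; have : m = 0 := by omega
            subst this; exact hk
  | succ n ih =>
    intro k hk
    rcases Nat.lt_or_ge m (n + 1) with h | h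
    · rw [Function.iterate_succ_apply']
      exact pv_mem_step_of_mem d _ k (ih (by omega) k hk)
    · have : m = n + 1 := by omega
      subst this; exact hk

-- under Pre_, every node reached in any number of rounds is reached in at most
-- pvRank s rounds (ranks strictly decrease along the discovery path)
theorem pv_reach_short (d : List (String × List String)) (s : String)
    (hpre : Pre_calculate_all_paths_to_destination d s) :
    ∀ n k, k ∈ (pvStep d)^[n] [s] →
      ∃ m, k ∈ (pvStep d)^[m] [s] ∧ m + pvRank d k ≤ pvRank d s := by
  intro n
  induction n with
  | zero =>
    intro k hk
    simp only [Function.iterate_zero, id] at hk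
    have : k = s := by simpa using hk
    subst this
    exact ⟨0, by simp, by omega⟩
  | succ n ih =>
    intro k hk
    rw [Function.iterate_succ_apply'] at hk
    rcases pv_mem_step_elim d _ k hk with h | ⟨p, hp, hpn, hck, hout, hkey⟩
    · exact ih k h
    · obtain ⟨m, hpm, hmr⟩ := ih p.1 hpn
      have hmN : m ≤ d.length := by
        have := pv_rank_le d s; omega
      have hpN : p.1 ∈ (pvStep d)^[d.length + 1] [s] :=
        pv_iter_mono d s (by omega) p.1 hpm
      have hlt := hpre p hp hpN k hck hout hkey
      refine ⟨m + 1, ?_, by omega⟩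
      rw [Function.iterate_succ_apply']
      exact pv_mem_step_of_edge d _ p hp hpm k hck hout hkey

-- closure of the reachable set at the final round
theorem pv_closure (d : List (String × List String)) (s : String)
    (hpre : Pre_calculate_all_paths_to_destination d s)
    (k c : String) (hk : k ∈ (pvStep d)^[d.length + 1] [s])
    (hc : c ∈ PySem.Dict.getD (PySem.Dict.mk d) k [])
    (hout : c ≠ "out") (hkey : PySem.Dict.contains (PySem.Dict.mk d) c = true) :
    c ∈ (pvStep d)^[d.length + 1] [s] := by
  obtain ⟨m, hkm, hmr⟩ := pv_reach_short d s hpre _ k hk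
  have hmN : m ≤ d.length := by have := pv_rank_le d s; omega
  obtain ⟨p, hp, hpk⟩ := pv_mem_of_contains d k (pv_contains_of_conn d k c hc)
  have : c ∈ (pvStep d)^[m + 1] [s] := by
    rw [Function.iterate_succ_apply']
    exact pv_mem_step_of_edge d _ p hp (by rw [hpk]; exact hkm) c (by rw [hpk]; exact hc) hout hkey
  exact pv_iter_mono d s (by omega) c this

-- if cur is reachable and has the edge cur → c then Pre_ gives rank descent
theorem pv_descent (d : List (String × List String)) (s : String)
    (hpre : Pre_calculate_all_paths_to_destination d s)
    (cur : String) (hcur : cur ∈ (pvStep d)^[d.length + 1] [s])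
    (c : String) (hc : c ∈ PySem.Dict.getD (PySem.Dict.mk d) cur [])
    (hout : c ≠ "out") (hkey : PySem.Dict.contains (PySem.Dict.mk d) c = true) :
    pvRank d c < pvRank d cur := by
  obtain ⟨p, hp, hpk⟩ := pv_mem_of_contains d cur (pv_contains_of_conn d cur c hc)
  have := hpre p hp (by rw [hpk]; exact hcur) c (by rw [hpk]; exact hc) hout hkey
  rwa [hpk] at this

-- B's helper unfolded to a closed form
theorem pv_pathsFrom_succ (d : List (String × List String)) (f : Nat) (cur : String) (path : List String) :
    pvPathsFrom d (f + 1) cur path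
      = ((PySem.Dict.getD (PySem.Dict.mk d) cur []).filter (fun c => c == "out")).map (fun c => path ++ [c])
        ++ (((PySem.Dict.getD (PySem.Dict.mk d) cur []).reverse.filter
              (fun c => !(c == "out") && PySem.Dict.contains (PySem.Dict.mk d) c)).flatMap
            (fun c => pvPathsFrom d f c (path ++ [c]))) := by
  conv_lhs => rw [pvPathsFrom]
  rw [pv_foldl_append_if_flatMap]

-- on reachable nodes, the result of B's helper does not depend on the fuel once
-- it exceeds the rank
theorem pv_pathsFrom_stable (d : List (String × List String)) (s : String)
    (hpre : Pre_calculate_all_paths_to_destination d s) :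
    ∀ f g cur path, cur ∈ (pvStep d)^[d.length + 1] [s] →
      pvRank d cur < f → pvRank d cur < g →
      pvPathsFrom d f cur path = pvPathsFrom d g cur path := by
  intro f
  induction f with
  | zero => intro g cur path _ hf; omega
  | succ f ih =>
    intro g cur path hcur hf hg
    cases g with
    | zero => omega
    | succ g =>
      rw [pv_pathsFrom_succ, pv_pathsFrom_succ]
      congr 1
      have hmap : ∀ c ∈ (PySem.Dict.getD (PySem.Dict.mk d) cur []).reverse.filter
            (fun c => !(c == "out") && PySem.Dict.contains (PySem.Dict.mk d) c),
          pvPathsFrom d f c (path ++ [c]) = pvPathsFrom d g c (path ++ [c]) := by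
        intro c hcmem
        have hc := (List.mem_filter.mp hcmem).2
        have hcin : c ∈ PySem.Dict.getD (PySem.Dict.mk d) cur [] :=
          List.mem_reverse.mp (List.mem_filter.mp hcmem).1
        rw [Bool.and_eq_true] at hc
        obtain ⟨hout', hkey⟩ := hc
        have hout : c ≠ "out" := by
          intro h; subst h; simp at hout'
        have hlt := pv_descent d s hpre cur hcur c hcin hout hkey
        have hcre := pv_closure d s hpre cur c hcur hcin hout hkey
        exact ih g c (path ++ [c]) hcre (by omega) (by omega)
      simp only [List.flatMap]
      rw [List.map_congr_left hmap]

-- A's inner for-loop in closed form: outs added to the set, non-out keys pushed (reversed at the top)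
theorem pv_stepA (d : List (String × List String)) (path : List String) :
    ∀ (conns : List String) (acc : PySem.Set (List String)) (st : List (String × List String)),
      conns.foldl
        (fun (st : PySem.Set (List String) × List (String × List String)) conn =>
          if conn == "out" then (PySem.Set.add st.1 (path ++ [conn]), st.2)
          else if PySem.Dict.contains (PySem.Dict.mk d) conn then (st.1, (conn, path ++ [conn]) :: st.2)
          else st)
        (acc, st)
      = (PySem.Set.update acc ((conns.filter (fun c => c == "out")).map (fun c => path ++ [c])),
         ((conns.filter (fun c => !(c == "out") && PySem.Dict.contains (PySem.Dict.mk d) c)).map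
            (fun c => (c, path ++ [c]))).reverse ++ st) := by
  intro conns
  induction conns with
  | nil => intro acc st; simp [PySem.Set.update]
  | cons c conns ih =>
    intro acc st
    rw [List.foldl_cons]
    dsimp only
    by_cases hout : (c == "out") = true
    · rw [if_pos hout, ih]
      rw [List.filter_cons_of_pos (by simpa using hout),
        List.filter_cons_of_neg (by simp [hout]),
        List.map_cons, PySem.Set.update_cons]
    · have h1 : (c == "out") = false := Bool.eq_false_iff.mpr hout
      by_cases hkey : PySem.Dict.contains (PySem.Dict.mk d) c = true
      · rw [if_neg hout, if_pos hkey, ih]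
        rw [List.filter_cons_of_neg (by simp [h1]),
          List.filter_cons_of_pos (by simp [h1, hkey]),
          List.map_cons, List.reverse_cons, List.append_assoc]
        rfl
      · have h2 : PySem.Dict.contains (PySem.Dict.mk d) c = false := Bool.eq_false_iff.mpr hkey
        rw [if_neg hout, if_neg hkey, ih]
        rw [List.filter_cons_of_neg (by simp [h1]),
          List.filter_cons_of_neg (by simp [h1, h2])]

-- main invariant: with enough fuel, A's stack loop processes each (reachable)
-- frame's whole subtree (B's helper) in LIFO order
theorem pv_main (d : List (String × List String)) (s : String)
    (hpre : Pre_calculate_all_paths_to_destination d s) :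
    ∀ fuel stack acc,
      (∀ fr ∈ stack, fr.1 ∈ (pvStep d)^[d.length + 1] [s]) →
      (stack.map (fun fr => ((d.map (fun p => p.2.length)).sum + 1) ^ pvRank d fr.1)).sum ≤ fuel →
      pvLoopA d fuel stack acc =
        stack.foldl (fun a fr => PySem.Set.update a (pvPathsFrom d (d.length + 1) fr.1 fr.2)) acc := by
  intro fuel
  induction fuel with
  | zero =>
    intro stack acc _ hμ
    cases stack with
    | nil => rfl
    | cons fr rest =>
      exfalso
      have h1 : 1 ≤ ((d.map (fun p => p.2.length)).sum + 1) ^ pvRank d fr.1 :=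
        Nat.one_le_pow _ _ (by omega)
      simp only [List.map_cons, List.sum_cons] at hμ
      omega
  | succ fuel ih =>
    intro stack acc hre hμ
    cases stack with
    | nil => rfl
    | cons fr rest =>
      obtain ⟨cur, path⟩ := fr
      have hcur : cur ∈ (pvStep d)^[d.length + 1] [s] := hre (cur, path) (List.mem_cons_self)
      simp only [pvLoopA]
      rw [pv_stepA]
      dsimp only
      -- abbreviations
      set C := (d.map (fun p => p.2.length)).sum with hC
      set conns := PySem.Dict.getD (PySem.Dict.mk d) cur [] with hconns
      set kids := (conns.filter (fun c => !(c == "out") && PySem.Dict.contains (PySem.Dict.mk d) c)).map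
            (fun c => (c, path ++ [c])) with hkids
      have hkidedge : ∀ fr ∈ kids, fr.1 ∈ conns ∧ fr.1 ≠ "out" ∧ PySem.Dict.contains (PySem.Dict.mk d) fr.1 = true := by
        intro fr hfr
        rw [hkids] at hfr
        obtain ⟨c, hcf, rfl⟩ := List.mem_map.mp hfr
        have hcin := (List.mem_filter.mp hcf).1
        have hca := (List.mem_filter.mp hcf).2
        rw [Bool.and_eq_true] at hca
        obtain ⟨hout', hkey⟩ := hca
        exact ⟨hcin, by intro h; exact absurd hout' (by simp [show c = "out" from h]), hkey⟩
      have hkidrank : ∀ fr ∈ kids, pvRank d fr.1 < pvRank d cur := by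
        intro fr hfr
        obtain ⟨hcin, hout, hkey⟩ := hkidedge fr hfr
        exact pv_descent d s hpre cur hcur fr.1 (by rw [← hconns]; exact hcin) hout hkey
      have hkidre : ∀ fr ∈ kids, fr.1 ∈ (pvStep d)^[d.length + 1] [s] := by
        intro fr hfr
        obtain ⟨hcin, hout, hkey⟩ := hkidedge fr hfr
        exact pv_closure d s hpre cur fr.1 hcur (by rw [← hconns]; exact hcin) hout hkey
      have hre' : ∀ fr ∈ kids.reverse ++ rest, fr.1 ∈ (pvStep d)^[d.length + 1] [s] := by
        intro fr hfr
        rcases List.mem_append.mp hfr with h | h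
        · exact hkidre fr (List.mem_reverse.mp h)
        · exact hre fr (List.mem_cons_of_mem _ h)
      -- fuel accounting
      have hμ' : ((kids.reverse ++ rest).map (fun fr => (C + 1) ^ pvRank d fr.1)).sum ≤ fuel := by
        simp only [List.map_cons, List.sum_cons] at hμ
        have hkidsum : (kids.map (fun fr => (C + 1) ^ pvRank d fr.1)).sum + 1 ≤ (C + 1) ^ pvRank d cur := by
          rcases hk : kids with _ | ⟨k0, ks⟩
          · simpa using Nat.one_le_pow _ _ (by omega)
          · have hr1 : 1 ≤ pvRank d cur := by
              have := hkidrank k0 (by rw [hk]; exact List.mem_cons_self)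
              omega
            have hbound : ∀ x ∈ kids.map (fun fr => (C + 1) ^ pvRank d fr.1),
                x ≤ (C + 1) ^ (pvRank d cur - 1) := by
              intro x hx
              obtain ⟨fr, hfr, rfl⟩ := List.mem_map.mp hx
              exact Nat.pow_le_pow_right (by omega) (by have := hkidrank fr hfr; omega)
            have hlen : kids.length ≤ C := by
              rw [hkids]
              calc ((conns.filter _).map _).length ≤ conns.length := by
                    simp [List.length_filter_le]
                _ ≤ C := pv_conns_len_le d cur
            have hsum := List.sum_le_card_nsmul _ _ hbound
            rw [List.length_map] at hsum
            have : (kids.map (fun fr => (C + 1) ^ pvRank d fr.1)).sum ≤ C * (C + 1) ^ (pvRank d cur - 1) := by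
              calc (kids.map (fun fr => (C + 1) ^ pvRank d fr.1)).sum
                  ≤ kids.length • (C + 1) ^ (pvRank d cur - 1) := hsum
                _ = kids.length * (C + 1) ^ (pvRank d cur - 1) := smul_eq_mul _ _
                _ ≤ C * (C + 1) ^ (pvRank d cur - 1) := Nat.mul_le_mul_right _ hlen
            have hpow : (C + 1) ^ pvRank d cur = (C + 1) * (C + 1) ^ (pvRank d cur - 1) := by
              conv_lhs => rw [show pvRank d cur = (pvRank d cur - 1) + 1 by omega]
              rw [pow_succ]; ring
            have h1 : 1 ≤ (C + 1) ^ (pvRank d cur - 1) := Nat.one_le_pow _ _ (by omega)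
            rw [← hk]
            nlinarith
          -- end rcases
        simp only [List.map_append, List.sum_append, List.map_reverse, List.sum_reverse]
        omega
      rw [ih _ _ hre' hμ']
      rw [List.foldl_append, List.foldl_cons]
      have hrev : kids.reverse
          = ((conns.filter (fun c => !(c == "out") && PySem.Dict.contains (PySem.Dict.mk d) c)).reverse).map
              (fun c => (c, path ++ [c])) := by
        rw [hkids]; simp
      have hfr : (conns.filter (fun c => !(c == "out") && PySem.Dict.contains (PySem.Dict.mk d) c)).reverse
          = conns.reverse.filter (fun c => !(c == "out") && PySem.Dict.contains (PySem.Dict.mk d) c) := by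
        rw [List.filter_reverse]
      have hinit : List.foldl (fun a fr => PySem.Set.update a (pvPathsFrom d (d.length + 1) fr.1 fr.2))
            (PySem.Set.update acc ((conns.filter (fun c => c == "out")).map (fun c => path ++ [c])))
            kids.reverse
          = PySem.Set.update acc (pvPathsFrom d (d.length + 1) cur path) := by
        rw [pv_foldl_update, pv_pathsFrom_succ, ← hconns, PySem.Set.update_append]
        congr 1
        rw [hrev, hfr]
        simp only [List.flatMap, List.map_map]
        congr 1
        apply List.map_congr_left
        intro c hcmem
        have hca := (List.mem_filter.mp hcmem).2
        rw [Bool.and_eq_true] at hca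
        obtain ⟨hout', hkey⟩ := hca
        have hcin : c ∈ conns := List.mem_reverse.mp (List.mem_filter.mp hcmem).1
        have hout : c ≠ "out" := by intro h; subst h; simp at hout'
        have hlt := pv_descent d s hpre cur hcur c (by rw [← hconns]; exact hcin) hout hkey
        have hcre := pv_closure d s hpre cur c hcur (by rw [← hconns]; exact hcin) hout hkey
        have hle := pv_rank_le d cur
        exact (pv_pathsFrom_stable d s hpre _ _ c (path ++ [c]) hcre (by omega) (by omega)).symm
      rw [hinit]

-- ===== VERDICT (by name: the statement is the Claim_ definition above) =====
theorem calculate_all_paths_to_destination_spec : Claim_equal_calculate_all_paths_to_destination := by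
  intro d s _ hpre
  unfold Spec_calculate_all_paths_to_destination
  unfold calculate_all_paths_to_destination calculate_all_paths_to_destination_alt
  rw [pv_main d s hpre]
  · rw [List.foldl_cons, List.foldl_nil]
    exact PySem.Set.update_nil_left _
  · intro fr hfr
    have : fr = (s, [s]) := by simpa using hfr
    subst this
    exact pv_iter_mono d s (Nat.zero_le _) s (by simp)
  · simp only [List.map_cons, List.map_nil, List.sum_cons, List.sum_nil]
    have h1 := pv_rank_le d s
    have := Nat.pow_le_pow_right (show 1 ≤ (d.map (fun p => p.2.length)).sum + 1 by omega)
      (show pvRank d s ≤ d.length + 1 by omega)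
    omega
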